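-- pv_equiv track=rewrite | github.com/christianfreystein/foosball-statistics | check_if_ball_in_table.py | find_y_area
-- ===== SOURCE A (Python) =====
-- def find_y_area(y):
--     y_areas = {
--         (61, 162): "Left 2",
--         (162, 209): "Right 0",
--         (209, 269): "Left 1",
--         (269, 333): "Right 1",
--         (333, 415): "Left 0",
--         (415, 570): "Right 2"
--     }
--
--     for (y_min, y_max), area_name in y_areas.items():
--         if y_min <= y < y_max:
--             return area_name
--
--     return "Outside"
-- ===== SOURCE B (Python) =====
-- import bisect
--
-- _BOUNDS = [61, 162, 209, 269, 333, 415, 570]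
-- _NAMES = ["Left 2", "Right 0", "Left 1", "Right 1", "Left 0", "Right 2"]
--
-- def find_y_area(y):
--     i = bisect.bisect_right(_BOUNDS, y) - 1
--     if 0 <= i < len(_NAMES):
--         return _NAMES[i]
--     return "Outside"
-- ===== Notes on version B (the rewrite author's own statement) =====
-- stated objective: idiomatic
-- what changed: Replaces the linear scan over a dict of (y_min,y_max) interval keys with one bisect_right binary search on a sorted boundary list paired with a parallel name list (intervals are contiguous).
import Mathlib
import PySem

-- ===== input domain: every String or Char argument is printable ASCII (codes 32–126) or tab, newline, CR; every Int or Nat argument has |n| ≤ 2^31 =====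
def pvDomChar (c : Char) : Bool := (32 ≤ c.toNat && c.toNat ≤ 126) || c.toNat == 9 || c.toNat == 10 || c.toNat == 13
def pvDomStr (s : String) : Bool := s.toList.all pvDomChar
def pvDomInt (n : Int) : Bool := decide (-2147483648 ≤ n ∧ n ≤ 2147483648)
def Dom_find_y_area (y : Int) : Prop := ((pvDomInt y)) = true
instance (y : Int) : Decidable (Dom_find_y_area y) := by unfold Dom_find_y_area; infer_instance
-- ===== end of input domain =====

-- B replaces A's linear scan over interval keys with one bisect_right binary search on a
-- sorted boundary list plus a parallel name list (more idiomatic; same results).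

-- ===== PORT A =====
-- the dict loop of A: scan the (y_min, y_max) → name pairs in insertion order, first match wins
def findYLoop (y : Int) : List ((Int × Int) × String) → String
  | [] => "Outside"
  | ((ymin, ymax), name) :: rest =>
      if ymin ≤ y ∧ y < ymax then name else findYLoop y rest

def find_y_area (y : Int) : String :=
  findYLoop y
    [((61, 162), "Left 2"), ((162, 209), "Right 0"), ((209, 269), "Left 1"),
     ((269, 333), "Right 1"), ((333, 415), "Left 0"), ((415, 570), "Right 2")]

-- ===== PORT B =====
-- faithful transliteration of Python's bisect.bisect_right (lo/hi always in [0, len xs] here,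
-- so xs[mid] is in range and getD is exact; (lo+hi)/2 on nonnegative ints matches Python's //)
def bisectRight (xs : List Int) (x : Int) (lo hi : Nat) : Nat :=
  if lo < hi then
    let mid := (lo + hi) / 2
    if x < xs.getD mid 0 then bisectRight xs x lo mid else bisectRight xs x (mid + 1) hi
  else lo
termination_by hi - lo
decreasing_by all_goals omega

def pvBounds : List Int := [61, 162, 209, 269, 333, 415, 570]
def pvNames : List String := ["Left 2", "Right 0", "Left 1", "Right 1", "Left 0", "Right 2"]

def find_y_area_alt (y : Int) : String :=
  let i : Int := (bisectRight pvBounds y 0 pvBounds.length : Int) - 1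
  if 0 ≤ i ∧ i < (pvNames.length : Int) then pvNames.getD i.toNat "" else "Outside"

-- ===== PRECONDITION & SPEC =====
def Spec_find_y_area (y : Int) (out : String) : Prop := out = find_y_area_alt y
instance (y : Int) (out : String) : Decidable (Spec_find_y_area y out) := by unfold Spec_find_y_area; infer_instance

-- ===== CLAIM (what is proved, stated in full; the proofs are below) =====
def Claim_equal_find_y_area : Prop := ∀ (y : Int), Dom_find_y_area y → Spec_find_y_area y (find_y_area y)

-- ===== LEMMAS AND PROOFS =====

theorem bisect_pvBounds (y : Int) : bisectRight pvBounds y 0 7 =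
    if y < 269 then (if y < 162 then (if y < 61 then 0 else 1) else (if y < 209 then 2 else 3))
    else (if y < 415 then (if y < 333 then 4 else 5) else (if y < 570 then 6 else 7)) := by
  repeat' first
    | rfl
    | (refine if_congr Iff.rfl ?_ ?_)
    | (rw [bisectRight]; norm_num [pvBounds])

theorem find_y_area_eq (y : Int) : find_y_area y = find_y_area_alt y := by
  unfold find_y_area find_y_area_alt
  rw [show pvBounds.length = 7 from rfl, bisect_pvBounds y]
  simp only [findYLoop, apply_ite (fun n : Nat => (n : Int))]
  norm_num [pvNames]
  split_ifs <;> first | rfl | omega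

-- ===== VERDICT (by name: the statement is the Claim_ definition above) =====
theorem find_y_area_spec : Claim_equal_find_y_area := by
  intro y _
  exact find_y_area_eq y
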